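-- pv_equiv track=rewrite | github.com/Rashnotech/Travelling_salesman_algorithm | insertion_heuritstic.py | insertion_heuristic_tsp
-- ===== SOURCE A (Python) =====
-- def insertion_heuristic_tsp(distances):
--     n = len(distances)
--     unvisited = set(range(1, n))  # Start with all cities unvisited
--     tour = [0]  # Start the tour with the first city (usually arbitrary)
--
--     while unvisited:
--         min_increase = float('inf')
--         best_city = None
--         best_position = None
--
--         for city in unvisited:
--             for i in range(len(tour)):
--                 # Try inserting city at position i and calculate the increase in tour length
--                 prev_city = tour[i]
--                 next_city = tour[(i + 1) % len(tour)]
--                 increase = distances[prev_city][city] + distances[city][next_city] - distances[prev_city][next_city]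
--
--                 if increase < min_increase:
--                     min_increase = increase
--                     best_city = city
--                     best_position = i
--
--         # Insert the best city at the best position
--         tour.insert(best_position + 1, best_city)
--         unvisited.remove(best_city)
--
--     # Return to the starting city to complete the tour
--     tour.append(tour[0])
--
--     return tour
-- ===== SOURCE B (Python) =====
-- def insertion_heuristic_tsp(distances):
--     n = len(distances)
--
--     def cost(u, c, v):
--         return distances[u][c] + distances[c][v] - distances[u][v]
--
--     tour = [0]
--     # best[c] = lexicographically smallest (insertion cost, position) over current tour edges
--     best = {c: (cost(0, c, 0), 0) for c in range(1, n)}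
--
--     while best:
--         # select the city with smallest (cost, city)
--         b = bb = bp = None
--         for c, (oc, op) in best.items():
--             if b is None or oc < bb or (oc == bb and c < b):
--                 b, bb, bp = c, oc, op
--         p = bp
--         u = tour[p]
--         v = tour[(p + 1) % len(tour)]
--         del best[b]
--         tour = tour[:p + 1] + [b] + tour[p + 1:]
--         # incrementally repair each remaining city's record: edge (u,v) at position p
--         # was replaced by (u,b) at p and (b,v) at p+1; later positions shift by one
--         m = len(tour)
--         for c, (oc, op) in best.items():
--             if op != p:
--                 cands = [(oc, op if op < p else op + 1)]
--             else:  # its best edge was the removed one: rescan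
--                 cands = [(cost(tour[i], c, tour[(i + 1) % m]), i) for i in range(m)]
--             cands.append((cost(u, c, b), p))
--             cands.append((cost(b, c, v), p + 1))
--             best[c] = min(cands)
--
--     tour.append(tour[0])
--     return tour
-- ===== Notes on version B (the rewrite author's own statement) =====
-- stated objective: faster
-- what changed: A rescans every (unvisited city, tour edge) pair from scratch each round (O(n^3)); B maintains for each unvisited city its best (insertion cost, position) record and after each insertion repairs only the records touched by the replaced edge (full rescan only for a city whose recorded best edge was the one removed), making a typical round O(n).
-- outside the precondition, e.g. on insertion_heuristic_tsp([[]]): A returns [0, 0], B returns [0, 0]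
import Mathlib
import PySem

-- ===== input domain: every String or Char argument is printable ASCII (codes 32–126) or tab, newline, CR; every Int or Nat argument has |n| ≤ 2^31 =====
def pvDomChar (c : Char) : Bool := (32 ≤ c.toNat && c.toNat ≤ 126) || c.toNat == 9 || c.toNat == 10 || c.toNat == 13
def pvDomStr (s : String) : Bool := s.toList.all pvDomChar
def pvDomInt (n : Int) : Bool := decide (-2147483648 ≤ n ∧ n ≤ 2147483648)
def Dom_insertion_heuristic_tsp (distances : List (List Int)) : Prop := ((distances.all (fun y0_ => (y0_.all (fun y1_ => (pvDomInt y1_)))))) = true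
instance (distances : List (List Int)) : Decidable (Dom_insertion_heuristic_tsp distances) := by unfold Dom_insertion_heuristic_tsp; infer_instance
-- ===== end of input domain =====

-- B replaces A's full rescan of every (unvisited city, tour edge) pair each round by a per-city
-- record of the best (insertion cost, position), repaired incrementally after each insertion
-- (only the replaced edge's two new edges are examined, with a rescan only for a city whose
-- recorded best edge was the removed one): objective 'faster' (measured asymptotic speed-up).

-- ===== PORT A =====
def pvDA (distances : List (List Int)) (u v : Int) : Int :=
  PySem.List.pyGetD (PySem.List.pyGetD distances u []) v 0

def pvStepA (distances : List (List Int)) (tour : List Int) (c : Int)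
    (acc : Option (Int × Int × Int)) (i : Int) : Option (Int × Int × Int) :=
  let prev := PySem.List.pyGetD tour i 0
  let next := PySem.List.pyGetD tour (PySem.Int.mod (i + 1) (tour.length : Int)) 0
  let inc := pvDA distances prev c + pvDA distances c next - pvDA distances prev next
  match acc with
  | none => some (inc, c, i)
  | some m => if inc < m.1 then some (inc, c, i) else some m

def pvBestA (distances : List (List Int)) (tour unvisited : List Int) : Option (Int × Int × Int) :=
  unvisited.foldl (fun acc c =>
    (PySem.List.pyRange 0 (tour.length : Int) 1).foldl (pvStepA distances tour c) acc) none

def pvLoopA (distances : List (List Int)) : Nat → List Int → List Int → List Int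
  | 0, _, tour => tour
  | fuel + 1, unvisited, tour =>
    if unvisited.isEmpty then tour
    else
      match pvBestA distances tour unvisited with
      | none => tour
      | some m =>
          pvLoopA distances fuel ((PySem.Set.remove? unvisited m.2.1).getD unvisited)
            (PySem.List.insert tour (m.2.2 + 1) m.2.1)

def insertion_heuristic_tsp (distances : List (List Int)) : List Int :=
  let n := distances.length
  let unvisited : PySem.Set Int := PySem.Set.ofList (PySem.List.pyRange 1 (n : Int) 1)
  let tour := pvLoopA distances unvisited.length unvisited [0]
  tour ++ [PySem.List.pyGetD tour 0 0]

-- ===== PORT B =====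
def pvCost (d : List (List Int)) (u c v : Int) : Int :=
  pvDA d u c + pvDA d c v - pvDA d u v

-- best = {c: (cost(0, c, 0), 0) for c in range(1, n)}
def pvInitBest (d : List (List Int)) (n : Int) : PySem.Dict Int (Int × Int) :=
  (PySem.List.pyRange 1 n 1).foldl
    (fun acc c => acc.insert c (pvCost d 0 c 0, 0)) PySem.Dict.empty

-- the selection loop over best.items(): smallest (cost, city), first wins
def pvPickB (items : List (Int × Int × Int)) : Option (Int × Int × Int) :=
  items.foldl (fun acc x =>
    match acc with
    | none => some x
    | some m => if x.2.1 < m.2.1 ∨ (x.2.1 = m.2.1 ∧ x.1 < m.1) then some x else some m) none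

-- min(cands) on a list of int pairs (lexicographic, first wins)
def pvMin2 (l : List (Int × Int)) : Option (Int × Int) :=
  l.foldl (fun acc x =>
    match acc with
    | none => some x
    | some m => if x.1 < m.1 ∨ (x.1 = m.1 ∧ x.2 < m.2) then some x else some m) none

-- the body of the repair loop, for one entry (c, (oc, op)) of best
def pvRepair (d : List (List Int)) (tour' : List Int) (u b v : Int) (p : Int)
    (e : Int × Int × Int) : Int × Int × Int :=
  let base : List (Int × Int) :=
    if e.2.2 ≠ p then [(e.2.1, if e.2.2 < p then e.2.2 else e.2.2 + 1)]
    else (PySem.List.pyRange 0 (tour'.length : Int) 1).map (fun i =>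
      (pvCost d (PySem.List.pyGetD tour' i 0) e.1
        (PySem.List.pyGetD tour' (PySem.Int.mod (i + 1) (tour'.length : Int)) 0), i))
  let cands := base ++ [(pvCost d u e.1 b, p), (pvCost d b e.1 v, p + 1)]
  (e.1, (pvMin2 cands).getD (0, 0))

def pvLoopBAlt (d : List (List Int)) :
    Nat → PySem.Dict Int (Int × Int) → List Int → List Int
  | 0, _, tour => tour
  | k + 1, best, tour =>
    match pvPickB best.items with
    | none => tour
    | some m =>
        let b := m.1
        let p := m.2.2
        let u := PySem.List.pyGetD tour p 0
        let v := PySem.List.pyGetD tour (PySem.Int.mod (p + 1) (tour.length : Int)) 0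
        let best' := PySem.Dict.erase best b
        let tour' := PySem.List.slice tour none (some (p + 1)) ++ [b] ++
          PySem.List.slice tour (some (p + 1)) none
        let best'' : PySem.Dict Int (Int × Int) :=
          PySem.Dict.mk (best'.items.map (pvRepair d tour' u b v p))
        pvLoopBAlt d k best'' tour'

def insertion_heuristic_tsp_alt (distances : List (List Int)) : List Int :=
  let n := distances.length
  let tour := pvLoopBAlt distances (n - 1) (pvInitBest distances (n : Int)) [0]
  tour ++ [PySem.List.pyGetD tour 0 0]

-- ===== PRECONDITION & SPEC =====
-- Pre_ excludes ragged inputs (some row shorter than the number of rows), on which Python A in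
-- general raises IndexError; every square (or wider) matrix is admitted.  On degenerate ragged
-- inputs whose short rows are never indexed (e.g. [[]]) A still returns, and B returns the same.
def Pre_insertion_heuristic_tsp (distances : List (List Int)) : Prop :=
  ∀ row ∈ distances, distances.length ≤ row.length
instance (distances : List (List Int)) : Decidable (Pre_insertion_heuristic_tsp distances) := by
  unfold Pre_insertion_heuristic_tsp; infer_instance

def pvWitness_insertion_heuristic_tsp : List (List Int) := [[0, 1], [1, 0]]

def Spec_insertion_heuristic_tsp (distances : List (List Int)) (out : List Int) : Prop :=
  out = insertion_heuristic_tsp_alt distances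
instance (distances : List (List Int)) (out : List Int) :
    Decidable (Spec_insertion_heuristic_tsp distances out) := by
  unfold Spec_insertion_heuristic_tsp; infer_instance

-- ===== CLAIM (what is proved, stated in full; the proofs are below) =====
def Claim_equal_insertion_heuristic_tsp : Prop :=
  ∀ (distances : List (List Int)), Dom_insertion_heuristic_tsp distances →
    Pre_insertion_heuristic_tsp distances →
    Spec_insertion_heuristic_tsp distances (insertion_heuristic_tsp distances)

-- ===== LEMMAS AND PROOFS =====

-- strict lexicographic orders used by the folds
def pvLt3 (x m : Int × Int × Int) : Prop :=
  x.1 < m.1 ∨ (x.1 = m.1 ∧ (x.2.1 < m.2.1 ∨ (x.2.1 = m.2.1 ∧ x.2.2 < m.2.2)))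

def pvLt2 (x m : Int × Int) : Prop :=
  x.1 < m.1 ∨ (x.1 = m.1 ∧ x.2 < m.2)

def pvLtP (x m : Int × Int × Int) : Prop :=
  x.2.1 < m.2.1 ∨ (x.2.1 = m.2.1 ∧ x.1 < m.1)

lemma pvLt3_trans (x y z : Int × Int × Int) (h : pvLt3 x y) (h' : pvLt3 y z) : pvLt3 x z := by
  obtain ⟨a, b, c⟩ := x; obtain ⟨d, e, f⟩ := y; obtain ⟨g, i, j⟩ := z
  simp only [pvLt3] at *; omega

lemma pvLt3_irrefl (x : Int × Int × Int) : ¬ pvLt3 x x := by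
  obtain ⟨a, b, c⟩ := x; simp only [pvLt3]; omega

lemma pvLt3_connex (x y : Int × Int × Int) (h : ¬ pvLt3 x y) (h' : ¬ pvLt3 y x) : x = y := by
  obtain ⟨a, b, c⟩ := x; obtain ⟨d, e, f⟩ := y
  simp only [pvLt3, not_or, Prod.mk.injEq] at *; omega

lemma pvLt2_trans (x y z : Int × Int) (h : pvLt2 x y) (h' : pvLt2 y z) : pvLt2 x z := by
  obtain ⟨a, b⟩ := x; obtain ⟨d, e⟩ := y; obtain ⟨g, i⟩ := z
  simp only [pvLt2] at *; omega

lemma pvLt2_irrefl (x : Int × Int) : ¬ pvLt2 x x := by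
  obtain ⟨a, b⟩ := x; simp only [pvLt2]; omega

lemma pvLt2_connex (x y : Int × Int) (h : ¬ pvLt2 x y) (h' : ¬ pvLt2 y x) : x = y := by
  obtain ⟨a, b⟩ := x; obtain ⟨d, e⟩ := y
  simp only [pvLt2, not_or, Prod.mk.injEq] at *; omega

lemma pvLe2_trans (a b c : Int × Int) (h : ¬ pvLt2 a b) (h' : ¬ pvLt2 b c) : ¬ pvLt2 a c := by
  obtain ⟨x, y⟩ := a; obtain ⟨u, v⟩ := b; obtain ⟨s, t⟩ := c
  simp only [pvLt2, not_or] at *; omega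

lemma pvLtP_trans (x y z : Int × Int × Int) (h : pvLtP x y) (h' : pvLtP y z) : pvLtP x z := by
  obtain ⟨a, b, c⟩ := x; obtain ⟨d, e, f⟩ := y; obtain ⟨g, i, j⟩ := z
  simp only [pvLtP] at *; omega

lemma pvLtP_irrefl (x : Int × Int × Int) : ¬ pvLtP x x := by
  obtain ⟨a, b, c⟩ := x; simp only [pvLtP]; omega

-- generic first-wins fold-minimum specification
lemma pvFoldMinGo {α : Type} (lt : α → α → Prop)
    (step : Option α → α → Option α)
    (h1 : ∀ m x, lt x m → step (some m) x = some x)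
    (h2 : ∀ m x, ¬ lt x m → step (some m) x = some m)
    (htrans : ∀ x y z, lt x y → lt y z → lt x z)
    (hirr : ∀ x, ¬ lt x x) :
    ∀ (l : List α) (a : α),
      (∀ x ∈ a :: l, ∀ y ∈ a :: l, ¬ lt x y → ¬ lt y x → x = y) →
      ∃ m, l.foldl step (some a) = some m ∧ m ∈ a :: l ∧ ¬ lt a m ∧ ∀ x ∈ l, ¬ lt x m := by
  intro l
  induction l with
  | nil =>
    intro a _
    exact ⟨a, rfl, List.mem_cons_self, hirr a, by simp⟩
  | cons x rest ih =>
    intro a hconn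
    by_cases hx : lt x a
    · rw [List.foldl_cons, h1 a x hx]
      obtain ⟨m, hm, hmem, hxm, hall⟩ := ih x (by
        intro p hp q hq hpq hqp
        exact hconn p (List.mem_cons_of_mem a hp) q (List.mem_cons_of_mem a hq) hpq hqp)
      refine ⟨m, hm, List.mem_cons_of_mem a hmem, ?_, ?_⟩
      · intro ham
        exact hxm (htrans x a m hx ham)
      · intro y hy
        rcases List.mem_cons.mp hy with rfl | hy
        · exact hxm
        · exact hall y hy
    · rw [List.foldl_cons, h2 a x hx]
      obtain ⟨m, hm, hmem, ham, hall⟩ := ih a (by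
        intro p hp q hq hpq hqp
        have hp' : p ∈ a :: x :: rest := by
          rcases List.mem_cons.mp hp with h | h
          · rw [h]; exact List.mem_cons_self
          · exact List.mem_cons_of_mem a (List.mem_cons_of_mem x h)
        have hq' : q ∈ a :: x :: rest := by
          rcases List.mem_cons.mp hq with h | h
          · rw [h]; exact List.mem_cons_self
          · exact List.mem_cons_of_mem a (List.mem_cons_of_mem x h)
        exact hconn p hp' q hq' hpq hqp)
      refine ⟨m, hm, ?_, ham, ?_⟩
      · rcases List.mem_cons.mp hmem with rfl | hmem
        · exact List.mem_cons_self
        · exact List.mem_cons_of_mem a (List.mem_cons_of_mem x hmem)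
      · intro y hy
        rcases List.mem_cons.mp hy with rfl | hy
        · intro hym
          by_cases hya : y = a
          · exact ham (hya ▸ hym)
          · rcases (by
              by_contra hax
              exact hya (hconn y (List.mem_cons_of_mem a List.mem_cons_self) a
                List.mem_cons_self hx hax) : lt a y) with hay
            exact ham (htrans a y m hay hym)
        · exact hall y hy

-- specs for the three concrete folds
def pvMin3 (l : List (Int × Int × Int)) : Option (Int × Int × Int) :=
  l.foldl (fun acc x =>
    match acc with
    | none => some x
    | some m =>
        if x.1 < m.1 ∨ (x.1 = m.1 ∧ (x.2.1 < m.2.1 ∨ (x.2.1 = m.2.1 ∧ x.2.2 < m.2.2)))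
        then some x else some m) none

lemma pvMin2_ex (a : Int × Int) (rest : List (Int × Int)) :
    ∃ m, pvMin2 (a :: rest) = some m ∧ m ∈ a :: rest ∧ ∀ x ∈ a :: rest, ¬ pvLt2 x m := by
  obtain ⟨m, hm, hmem, ham, hall⟩ :=
    pvFoldMinGo pvLt2
      (fun acc x =>
        match acc with
        | none => some x
        | some m => if x.1 < m.1 ∨ (x.1 = m.1 ∧ x.2 < m.2) then some x else some m)
      (fun m x hlt => if_pos hlt) (fun m x hlt => if_neg hlt) pvLt2_trans pvLt2_irrefl rest a
      (fun x _ y _ h h' => pvLt2_connex x y h h')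
  refine ⟨m, by simpa [pvMin2, List.foldl_cons] using hm, hmem, ?_⟩
  intro x hx
  rcases List.mem_cons.mp hx with rfl | hx
  · exact ham
  · exact hall x hx

lemma pvMin2_spec (l : List (Int × Int)) (m : Int × Int) (h : pvMin2 l = some m) :
    m ∈ l ∧ ∀ x ∈ l, ¬ pvLt2 x m := by
  cases l with
  | nil => simp [pvMin2] at h
  | cons a rest =>
    obtain ⟨m', hm', hmem, hall⟩ := pvMin2_ex a rest
    rw [h] at hm'
    obtain rfl : m = m' := by injection hm'
    exact ⟨hmem, hall⟩

lemma pvMin2_unique (l : List (Int × Int)) (m : Int × Int)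
    (hm : m ∈ l) (hmin : ∀ x ∈ l, ¬ pvLt2 x m) : pvMin2 l = some m := by
  cases l with
  | nil => simp at hm
  | cons a rest =>
    obtain ⟨m', hm', hmem, hall⟩ := pvMin2_ex a rest
    rw [hm', pvLt2_connex m' m (hmin m' hmem) (hall m hm)]

lemma pvMin3_ex (a : Int × Int × Int) (rest : List (Int × Int × Int)) :
    ∃ m, pvMin3 (a :: rest) = some m ∧ m ∈ a :: rest ∧ ∀ x ∈ a :: rest, ¬ pvLt3 x m := by
  obtain ⟨m, hm, hmem, ham, hall⟩ :=
    pvFoldMinGo pvLt3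
      (fun acc x =>
        match acc with
        | none => some x
        | some m =>
            if x.1 < m.1 ∨ (x.1 = m.1 ∧ (x.2.1 < m.2.1 ∨ (x.2.1 = m.2.1 ∧ x.2.2 < m.2.2)))
            then some x else some m)
      (fun m x hlt => if_pos hlt) (fun m x hlt => if_neg hlt) pvLt3_trans pvLt3_irrefl rest a
      (fun x _ y _ h h' => pvLt3_connex x y h h')
  refine ⟨m, by simpa [pvMin3, List.foldl_cons] using hm, hmem, ?_⟩
  intro x hx
  rcases List.mem_cons.mp hx with rfl | hx
  · exact ham
  · exact hall x hx

lemma pvMin3_unique (l : List (Int × Int × Int)) (m : Int × Int × Int)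
    (hm : m ∈ l) (hmin : ∀ x ∈ l, ¬ pvLt3 x m) : pvMin3 l = some m := by
  cases l with
  | nil => simp at hm
  | cons a rest =>
    obtain ⟨m', hm', hmem, hall⟩ := pvMin3_ex a rest
    rw [hm', pvLt3_connex m' m (hmin m' hmem) (hall m hm)]

lemma pvPickB_ex (a : Int × Int × Int) (rest : List (Int × Int × Int))
    (hnd : ((a :: rest).map (·.1)).Nodup) :
    ∃ m, pvPickB (a :: rest) = some m ∧ m ∈ a :: rest ∧ ∀ x ∈ a :: rest, ¬ pvLtP x m := by
  obtain ⟨m, hm, hmem, ham, hall⟩ :=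
    pvFoldMinGo pvLtP
      (fun acc x =>
        match acc with
        | none => some x
        | some m => if x.2.1 < m.2.1 ∨ (x.2.1 = m.2.1 ∧ x.1 < m.1) then some x else some m)
      (fun m x hlt => if_pos hlt) (fun m x hlt => if_neg hlt) pvLtP_trans pvLtP_irrefl rest a
      (by
        intro x hx y hy h h'
        have hkey : x.1 = y.1 := by
          obtain ⟨x1, x2, x3⟩ := x; obtain ⟨y1, y2, y3⟩ := y
          simp only [pvLtP, not_or, not_and, not_lt] at h h'
          omega
        exact List.inj_on_of_nodup_map hnd hx hy hkey)
  refine ⟨m, by simpa [pvPickB, List.foldl_cons] using hm, hmem, ?_⟩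
  intro x hx
  rcases List.mem_cons.mp hx with rfl | hx
  · exact ham
  · exact hall x hx

-- A's nested scan as a flat candidate list
def pvTriple (distances : List (List Int)) (tour : List Int) (c i : Int) : Int × Int × Int :=
  let prev := PySem.List.pyGetD tour i 0
  let next := PySem.List.pyGetD tour (PySem.Int.mod (i + 1) (tour.length : Int)) 0
  (pvDA distances prev c + pvDA distances c next - pvDA distances prev next, c, i)

def pvCandsA (distances : List (List Int)) (tour unvisited : List Int) : List (Int × Int × Int) :=
  unvisited.flatMap (fun c =>
    (PySem.List.pyRange 0 (tour.length : Int) 1).map (pvTriple distances tour c))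

def pvIncMin (l : List (Int × Int × Int)) : Option (Int × Int × Int) :=
  l.foldl (fun acc x =>
    match acc with
    | none => some x
    | some m => if x.1 < m.1 then some x else some m) none

lemma pvBestA_eq_incMin (distances : List (List Int)) (tour unvisited : List Int) :
    pvBestA distances tour unvisited = pvIncMin (pvCandsA distances tour unvisited) := by
  unfold pvBestA pvIncMin pvCandsA
  rw [List.foldl_flatMap]
  simp only [List.foldl_map]
  rfl

-- the (city, position) key order
def pvKeyLt (x y : Int × Int × Int) : Prop :=
  x.2.1 < y.2.1 ∨ (x.2.1 = y.2.1 ∧ x.2.2 < y.2.2)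

lemma pvIncMin_go (l : List (Int × Int × Int)) : ∀ (a : Int × Int × Int),
    (∀ x ∈ l, pvKeyLt a x) → l.Pairwise pvKeyLt →
    l.foldl (fun acc x =>
      match acc with
      | none => some x
      | some m => if x.1 < m.1 then some x else some m) (some a) =
    l.foldl (fun acc x =>
      match acc with
      | none => some x
      | some m =>
          if x.1 < m.1 ∨ (x.1 = m.1 ∧ (x.2.1 < m.2.1 ∨ (x.2.1 = m.2.1 ∧ x.2.2 < m.2.2)))
          then some x else some m) (some a) := by
  induction l with
  | nil => intros; rfl
  | cons x rest ih =>
    intro a hbelow hpw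
    have hkey : pvKeyLt a x := hbelow x List.mem_cons_self
    have hsame :
        (if x.1 < a.1 then some x else some a) =
        (if x.1 < a.1 ∨ (x.1 = a.1 ∧ (x.2.1 < a.2.1 ∨ (x.2.1 = a.2.1 ∧ x.2.2 < a.2.2)))
         then some x else some a) := by
      by_cases hlt : x.1 < a.1
      · rw [if_pos hlt, if_pos (Or.inl hlt)]
      · rw [if_neg hlt, if_neg ?_]
        intro hc
        rcases hc with hc | ⟨_, hc⟩
        · exact hlt hc
        · obtain ⟨a1, a2, a3⟩ := a
          obtain ⟨x1, x2, x3⟩ := x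
          simp only [pvKeyLt] at hkey
          rcases hc with hc | ⟨hc1, hc2⟩ <;> simp_all <;> omega
    simp only [List.foldl_cons]
    by_cases hlt : x.1 < a.1
    · rw [show (if x.1 < a.1 then some x else some a) = some x from if_pos hlt] at hsame
      rw [if_pos hlt, ← hsame]
      exact ih x (fun y hy => (List.pairwise_cons.mp hpw).1 y hy) (List.pairwise_cons.mp hpw).2
    · rw [show (if x.1 < a.1 then some x else some a) = some a from if_neg hlt] at hsame
      rw [if_neg hlt, ← hsame]
      exact ih a (fun y hy => hbelow y (List.mem_cons_of_mem _ hy)) (List.pairwise_cons.mp hpw).2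

lemma pvIncMin_eq_min3 (l : List (Int × Int × Int)) (h : l.Pairwise pvKeyLt) :
    pvIncMin l = pvMin3 l := by
  cases l with
  | nil => rfl
  | cons x rest =>
    unfold pvIncMin pvMin3
    simp only [List.foldl_cons]
    exact pvIncMin_go rest x (fun y hy => (List.pairwise_cons.mp h).1 y hy)
      (List.pairwise_cons.mp h).2

lemma pvCandsA_pairwise (distances : List (List Int)) (tour unvisited : List Int)
    (h : unvisited.Pairwise (· < ·)) :
    (pvCandsA distances tour unvisited).Pairwise pvKeyLt := by
  unfold pvCandsA
  induction unvisited with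
  | nil => simp
  | cons c cs ih =>
    rw [List.flatMap_cons, List.pairwise_append]
    obtain ⟨hc, hcs⟩ := List.pairwise_cons.mp h
    refine ⟨?_, ih hcs, ?_⟩
    · refine List.Pairwise.map _ ?_ (PySem.List.pairwise_lt_pyRange_one 0 (tour.length : Int))
      intro i j hij
      exact Or.inr ⟨rfl, hij⟩
    · intro x hx y hy
      obtain ⟨i, _, rfl⟩ := List.mem_map.mp hx
      obtain ⟨c', hc', hy'⟩ := List.mem_flatMap.mp hy
      obtain ⟨j, _, rfl⟩ := List.mem_map.mp hy'
      exact Or.inl (hc c' hc')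

-- nat-indexed view of the candidates
def pvW (d : List (List Int)) (tour : List Int) (c : Int) (i : Nat) : Int :=
  pvCost d (tour.getD i 0) c (tour.getD ((i + 1) % tour.length) 0)

def pvPairs (d : List (List Int)) (tour : List Int) (c : Int) : List (Int × Int) :=
  (List.range tour.length).map (fun i => (pvW d tour c i, (i : Int)))

lemma pvTriple_nat (d : List (List Int)) (tour : List Int) (c : Int) (i : Nat)
    (hi : i < tour.length) :
    pvTriple d tour c (i : Int) = (pvW d tour c i, c, (i : Int)) := by
  have hpos : (0 : Int) < (tour.length : Int) := by omega
  have hmod : PySem.Int.mod ((i : Int) + 1) (tour.length : Int) =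
      (((i + 1) % tour.length : Nat) : Int) := by
    rw [PySem.Int.mod_eq_emod_of_pos hpos, show ((i : Int) + 1) = (((i + 1 : Nat)) : Int) by
      push_cast; ring, Int.natCast_mod]
  unfold pvTriple pvW pvCost
  rw [hmod]
  simp only [PySem.List.pyGetD_natCast]

lemma pvCandsA_eq_nat (d : List (List Int)) (tour unv : List Int) :
    pvCandsA d tour unv = unv.flatMap (fun c => (List.range tour.length).map
      (fun i => (pvW d tour c i, c, (i : Int)))) := by
  unfold pvCandsA
  apply List.flatMap_congr
  intro c _
  rw [PySem.List.pyRange_zero_nat tour.length, List.map_map]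
  apply List.map_congr_left
  intro i hi
  exact pvTriple_nat d tour c i (List.mem_range.mp hi)

lemma mem_pvCandsA (d : List (List Int)) (tour unv : List Int) (x : Int × Int × Int) :
    x ∈ pvCandsA d tour unv ↔
      ∃ c ∈ unv, ∃ i : Nat, i < tour.length ∧ x = (pvW d tour c i, c, (i : Int)) := by
  rw [pvCandsA_eq_nat, List.mem_flatMap]
  constructor
  · rintro ⟨c, hc, hx⟩
    obtain ⟨i, hi, rfl⟩ := List.mem_map.mp hx
    exact ⟨c, hc, i, List.mem_range.mp hi, rfl⟩
  · rintro ⟨c, hc, i, hi, rfl⟩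
    exact ⟨c, hc, List.mem_map.mpr ⟨i, List.mem_range.mpr hi, rfl⟩⟩

lemma mem_pvPairs (d : List (List Int)) (tour : List Int) (c : Int) (y : Int × Int) :
    y ∈ pvPairs d tour c ↔ ∃ i : Nat, i < tour.length ∧ y = (pvW d tour c i, (i : Int)) := by
  unfold pvPairs
  constructor
  · intro hy
    obtain ⟨i, hi, rfl⟩ := List.mem_map.mp hy
    exact ⟨i, List.mem_range.mp hi, rfl⟩
  · rintro ⟨i, hi, rfl⟩
    exact List.mem_map.mpr ⟨i, List.mem_range.mpr hi, rfl⟩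

-- the tour after inserting b right after position p
def pvTourIns (tour : List Int) (p : Nat) (b : Int) : List Int :=
  tour.take (p + 1) ++ b :: tour.drop (p + 1)

lemma pvTourIns_length (tour : List Int) (p : Nat) (b : Int) (hp : p < tour.length) :
    (pvTourIns tour p b).length = tour.length + 1 := by
  unfold pvTourIns
  simp only [List.length_append, List.length_take, List.length_cons, List.length_drop]
  omega

lemma pvTourIns_getD_le (tour : List Int) (p : Nat) (b : Int) (i : Nat)
    (hp : p < tour.length) (hi : i ≤ p) :
    (pvTourIns tour p b).getD i 0 = tour.getD i 0 := by
  have hl : (tour.take (p + 1)).length = p + 1 := by rw [List.length_take]; omega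
  unfold pvTourIns
  rw [List.getD_eq_getElem?_getD, List.getElem?_append, if_pos (by omega),
    List.getElem?_take_of_lt (by omega), ← List.getD_eq_getElem?_getD]

lemma pvTourIns_getD_ins (tour : List Int) (p : Nat) (b : Int) (hp : p < tour.length) :
    (pvTourIns tour p b).getD (p + 1) 0 = b := by
  have hl : (tour.take (p + 1)).length = p + 1 := by rw [List.length_take]; omega
  unfold pvTourIns
  rw [List.getD_eq_getElem?_getD, List.getElem?_append_right (by omega)]
  simp [hl]

lemma pvTourIns_getD_ge (tour : List Int) (p : Nat) (b : Int) (i : Nat)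
    (hp : p < tour.length) (hi : p + 2 ≤ i) :
    (pvTourIns tour p b).getD i 0 = tour.getD (i - 1) 0 := by
  have hl : (tour.take (p + 1)).length = p + 1 := by rw [List.length_take]; omega
  unfold pvTourIns
  rw [List.getD_eq_getElem?_getD, List.getElem?_append_right (by omega), hl]
  have h1 : i - (p + 1) = (i - (p + 2)) + 1 := by omega
  rw [h1, List.getElem?_cons_succ, List.getElem?_drop, ← List.getD_eq_getElem?_getD]
  congr 1
  omega

-- the edge costs of the new tour, pointwise
lemma pvW_tourIns (d : List (List Int)) (tour : List Int) (p : Nat) (b c : Int)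
    (hp : p < tour.length) (i : Nat) (hi : i < tour.length + 1) :
    pvW d (pvTourIns tour p b) c i =
      if i < p then pvW d tour c i
      else if i = p then pvCost d (tour.getD p 0) c b
      else if i = p + 1 then pvCost d b c (tour.getD ((p + 1) % tour.length) 0)
      else pvW d tour c (i - 1) := by
  have hm := pvTourIns_length tour p b hp
  by_cases h1 : i < p
  · rw [if_pos h1]
    unfold pvW
    rw [hm, pvTourIns_getD_le tour p b i hp (by omega),
      Nat.mod_eq_of_lt (by omega : i + 1 < tour.length + 1),
      pvTourIns_getD_le tour p b (i + 1) hp (by omega),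
      Nat.mod_eq_of_lt (by omega : i + 1 < tour.length)]
  · rw [if_neg h1]
    by_cases h2 : i = p
    · subst h2
      rw [if_pos rfl]
      unfold pvW
      rw [hm, pvTourIns_getD_le tour i b i hp (le_refl i),
        Nat.mod_eq_of_lt (by omega : i + 1 < tour.length + 1),
        pvTourIns_getD_ins tour i b hp]
    · rw [if_neg h2]
      by_cases h3 : i = p + 1
      · subst h3
        rw [if_pos rfl]
        unfold pvW
        rw [hm, pvTourIns_getD_ins tour p b hp]
        by_cases h4 : p + 1 = tour.length
        · have e1 : (p + 1 + 1) % (tour.length + 1) = 0 := by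
            rw [show p + 1 + 1 = tour.length + 1 by omega]; exact Nat.mod_self _
          have e2 : (p + 1) % tour.length = 0 := by
            rw [h4]; exact Nat.mod_self _
          rw [e1, e2, pvTourIns_getD_le tour p b 0 hp (by omega)]
        · have : (p + 1 + 1) % (tour.length + 1) = p + 2 := Nat.mod_eq_of_lt (by omega)
          rw [this]
          have : (p + 1) % tour.length = p + 1 := Nat.mod_eq_of_lt (by omega)
          rw [this]
          rw [pvTourIns_getD_ge tour p b (p + 2) hp (by omega)]
          congr 1
      · -- p + 2 ≤ i ≤ tour.length
        have h5 : p + 2 ≤ i := by omega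
        rw [if_neg h3]
        unfold pvW
        rw [hm, pvTourIns_getD_ge tour p b i hp h5]
        by_cases h6 : i = tour.length
        · have e1 : (i + 1) % (tour.length + 1) = 0 := by
            rw [h6]; exact Nat.mod_self _
          rw [e1, pvTourIns_getD_le tour p b 0 hp (by omega)]
          have e2 : (i - 1 + 1) % tour.length = 0 := by
            rw [show i - 1 + 1 = tour.length by omega]; exact Nat.mod_self _
          rw [e2]
        · have e1 : (i + 1) % (tour.length + 1) = i + 1 := Nat.mod_eq_of_lt (by omega)
          rw [e1, pvTourIns_getD_ge tour p b (i + 1) hp (by omega)]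
          have e2 : (i - 1 + 1) % tour.length = i := by
            have : i - 1 + 1 = i := by omega
            rw [this]; exact Nat.mod_eq_of_lt (by omega)
          rw [e2, show i + 1 - 1 = i by omega]

lemma pvPairs_ne_nil (d : List (List Int)) (t : List Int) (c : Int) (h : t ≠ []) :
    pvPairs d t c ≠ [] := by
  unfold pvPairs
  simp only [ne_eq, List.map_eq_nil_iff, List.range_eq_nil, List.length_eq_zero_iff]
  exact h

lemma pvMin2_append_mem (S extras : List (Int × Int)) (hS : S ≠ [])
    (hsub : ∀ x ∈ extras, x ∈ S) : pvMin2 (S ++ extras) = pvMin2 S := by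
  obtain ⟨s0, srest, rfl⟩ := List.exists_cons_of_ne_nil hS
  obtain ⟨m, hm, hmem, hall⟩ := pvMin2_ex s0 srest
  rw [hm, List.cons_append]
  apply pvMin2_unique
  · rcases List.mem_cons.mp hmem with rfl | h
    · exact List.mem_cons_self
    · exact List.mem_cons_of_mem _ (List.mem_append_left _ h)
  · intro x hx
    rcases List.mem_cons.mp hx with rfl | hx
    · exact hall _ List.mem_cons_self
    · rcases List.mem_append.mp hx with hx | hx
      · exact hall x (List.mem_cons_of_mem _ hx)
      · exact hall x (hsub x hx)

lemma pvScan_eq_pairs (d : List (List Int)) (t : List Int) (c : Int) (h0 : 0 < t.length) :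
    (PySem.List.pyRange 0 (t.length : Int) 1).map (fun i =>
      (pvCost d (PySem.List.pyGetD t i 0) c
        (PySem.List.pyGetD t (PySem.Int.mod (i + 1) (t.length : Int)) 0), i)) = pvPairs d t c := by
  unfold pvPairs
  rw [PySem.List.pyRange_zero_nat t.length, List.map_map]
  apply List.map_congr_left
  intro i hi
  have hi' := List.mem_range.mp hi
  have hpos : (0 : Int) < (t.length : Int) := by exact_mod_cast h0
  have hmod : PySem.Int.mod ((i : Int) + 1) (t.length : Int) =
      (((i + 1) % t.length : Nat) : Int) := by
    rw [PySem.Int.mod_eq_emod_of_pos hpos, show ((i : Int) + 1) = (((i + 1 : Nat)) : Int) by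
      push_cast; ring, Int.natCast_mod]
  simp only [Function.comp_apply, hmod, PySem.List.pyGetD_natCast]
  rfl

-- the incremental repair of one record computes the new per-city minimum
lemma pvRepair_spec (d : List (List Int)) (tour : List Int) (p : Nat) (hp : p < tour.length)
    (b c oc : Int) (jop : Nat)
    (hold : pvMin2 (pvPairs d tour c) = some (oc, (jop : Int))) :
    pvMin2 (pvPairs d (pvTourIns tour p b) c) =
      some ((pvRepair d (pvTourIns tour p b) (tour.getD p 0) b
        (tour.getD ((p + 1) % tour.length) 0) (p : Int) (c, oc, (jop : Int))).2) := by
  obtain ⟨hmem, hmin⟩ := pvMin2_spec _ _ hold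
  obtain ⟨j0, hj0, hj0eq⟩ := (mem_pvPairs d tour c _).mp hmem
  rw [Prod.mk.injEq] at hj0eq
  obtain ⟨hoc, hjc⟩ := hj0eq
  have hjj : jop = j0 := by exact_mod_cast hjc
  subst hjj
  have hjop : jop < tour.length := hj0
  have hW := pvW_tourIns d tour p b c hp
  have hTlen := pvTourIns_length tour p b hp
  have hTne : pvTourIns tour p b ≠ [] := by
    intro h
    rw [h] at hTlen
    simp at hTlen
  have hx1 : (pvCost d (tour.getD p 0) c b, (p : Int)) ∈ pvPairs d (pvTourIns tour p b) c := by
    rw [mem_pvPairs]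
    refine ⟨p, by omega, ?_⟩
    rw [hW p (by omega), if_neg (lt_irrefl p), if_pos rfl]
  have hx2 : (pvCost d b c (tour.getD ((p + 1) % tour.length) 0), (p : Int) + 1) ∈
      pvPairs d (pvTourIns tour p b) c := by
    rw [mem_pvPairs]
    refine ⟨p + 1, by omega, ?_⟩
    rw [hW (p + 1) (by omega), if_neg (by omega), if_neg (by omega), if_pos rfl]
    rw [Prod.mk.injEq]
    exact ⟨rfl, by push_cast; ring⟩
  by_cases hcase : jop = p
  · -- the recorded best edge is the removed one: B rescans
    subst hcase
    have hrep : (pvRepair d (pvTourIns tour jop b) (tour.getD jop 0) b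
        (tour.getD ((jop + 1) % tour.length) 0) (jop : Int) (c, oc, (jop : Int))).2 =
        (pvMin2 (pvPairs d (pvTourIns tour jop b) c ++
          [(pvCost d (tour.getD jop 0) c b, (jop : Int)),
           (pvCost d b c (tour.getD ((jop + 1) % tour.length) 0), (jop : Int) + 1)])).getD (0, 0) := by
      simp only [pvRepair]
      rw [if_neg (by simp)]
      rw [pvScan_eq_pairs d (pvTourIns tour jop b) c (by omega)]
    rw [hrep, pvMin2_append_mem _ _ (pvPairs_ne_nil d _ c hTne) (by
      intro x hx
      rcases List.mem_cons.mp hx with rfl | hx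
      · exact hx1
      · rcases List.mem_cons.mp hx with rfl | hx
        · exact hx2
        · simp at hx)]
    obtain ⟨s0, srest, hSd⟩ := List.exists_cons_of_ne_nil (pvPairs_ne_nil d _ c hTne)
    rw [hSd]
    obtain ⟨m, hm, _, _⟩ := pvMin2_ex s0 srest
    rw [hm]
    rfl
  · -- the recorded best edge survives: only three candidates
    have hcast : (jop : Int) ≠ (p : Int) := by exact_mod_cast hcase
    obtain ⟨js, hjs, hjsd⟩ : ∃ js : Nat,
        (if (jop : Int) < (p : Int) then (jop : Int) else (jop : Int) + 1) = (js : Int) ∧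
          ((jop < p ∧ js = jop) ∨ (p < jop ∧ js = jop + 1)) := by
      by_cases h : jop < p
      · exact ⟨jop, by rw [if_pos (by exact_mod_cast h)], Or.inl ⟨h, rfl⟩⟩
      · exact ⟨jop + 1, by rw [if_neg (by exact_mod_cast h)]; push_cast; ring,
          Or.inr ⟨by omega, rfl⟩⟩
    have hWold : pvW d (pvTourIns tour p b) c js = pvW d tour c jop := by
      rcases hjsd with ⟨h1, h2⟩ | ⟨h1, h2⟩
      · rw [h2, hW jop (by omega), if_pos h1]
      · rw [h2, hW (jop + 1) (by omega), if_neg (by omega), if_neg (by omega), if_neg (by omega),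
          show jop + 1 - 1 = jop by omega]
    have holdmem : (oc, (js : Int)) ∈ pvPairs d (pvTourIns tour p b) c := by
      rw [mem_pvPairs]
      refine ⟨js, by omega, ?_⟩
      rw [Prod.mk.injEq]
      exact ⟨by rw [hoc, ← hWold], rfl⟩
    have hrep : (pvRepair d (pvTourIns tour p b) (tour.getD p 0) b
        (tour.getD ((p + 1) % tour.length) 0) (p : Int) (c, oc, (jop : Int))).2 =
        (pvMin2 ((oc, (js : Int)) ::
          [(pvCost d (tour.getD p 0) c b, (p : Int)),
           (pvCost d b c (tour.getD ((p + 1) % tour.length) 0), (p : Int) + 1)])).getD (0, 0) := by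
      simp only [pvRepair]
      rw [if_pos hcast, hjs]
      rfl
    obtain ⟨m, hm, hmm, hall⟩ := pvMin2_ex (oc, (js : Int))
      [(pvCost d (tour.getD p 0) c b, (p : Int)),
       (pvCost d b c (tour.getD ((p + 1) % tour.length) 0), (p : Int) + 1)]
    rw [hrep, hm]
    simp only [Option.getD_some]
    apply pvMin2_unique
    · rcases List.mem_cons.mp hmm with rfl | hmm
      · exact holdmem
      · rcases List.mem_cons.mp hmm with rfl | hmm
        · exact hx1
        · rcases List.mem_cons.mp hmm with rfl | hmm
          · exact hx2
          · simp at hmm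
    · intro y hy
      obtain ⟨i, hi, rfl⟩ := (mem_pvPairs d (pvTourIns tour p b) c y).mp hy
      rw [hTlen] at hi
      by_cases h1 : i < p
      · -- a surviving edge before the insertion point
        rw [hW i (by omega), if_pos h1]
        have hA : ¬ pvLt2 (pvW d tour c i, (i : Int)) (oc, (js : Int)) := by
          have hB := hmin (pvW d tour c i, (i : Int))
            ((mem_pvPairs d tour c _).mpr ⟨i, by omega, rfl⟩)
          simp only [pvLt2] at hB ⊢
          rcases hjsd with ⟨hh1, hh2⟩ | ⟨hh1, hh2⟩ <;> rw [hh2] <;> push_cast at hB ⊢ <;> omega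
        exact pvLe2_trans _ _ _ hA (hall _ List.mem_cons_self)
      · by_cases h2 : i = p
        · subst h2
          rw [hW i (by omega), if_neg (lt_irrefl i), if_pos rfl]
          exact hall _ (List.mem_cons_of_mem _ List.mem_cons_self)
        · by_cases h3 : i = p + 1
          · subst h3
            rw [hW (p + 1) (by omega), if_neg (by omega), if_neg (by omega), if_pos rfl]
            have : ((p + 1 : Nat) : Int) = (p : Int) + 1 := by push_cast; ring
            rw [this]
            exact hall _ (List.mem_cons_of_mem _ (List.mem_cons_of_mem _ List.mem_cons_self))
          · -- a surviving edge after the insertion point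
            have h5 : p + 2 ≤ i := by omega
            rw [hW i (by omega), if_neg h1, if_neg h2, if_neg h3]
            have hA : ¬ pvLt2 (pvW d tour c (i - 1), (i : Int)) (oc, (js : Int)) := by
              have hB := hmin (pvW d tour c (i - 1), ((i - 1 : Nat) : Int))
                ((mem_pvPairs d tour c _).mpr ⟨i - 1, by omega, rfl⟩)
              have hc1 : ((i - 1 : Nat) : Int) = (i : Int) - 1 := by
                push_cast [Nat.cast_sub (by omega : 1 ≤ i)]; ring
              rw [hc1] at hB
              simp only [pvLt2] at hB ⊢
              rcases hjsd with ⟨hh1, hh2⟩ | ⟨hh1, hh2⟩ <;> rw [hh2] <;> push_cast at hB ⊢ <;> omega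
            exact pvLe2_trans _ _ _ hA (hall _ List.mem_cons_self)

lemma pvInsert_nonneg (xs : List Int) (i : Int) (v : Int) (h : 0 ≤ i) :
    PySem.List.insert xs i v = xs.take i.toNat ++ v :: xs.drop i.toNat := by
  show (match PySem.List.sliceIndices xs.length (some i) none 1 with
    | (k, _, _) => List.take k.toNat xs ++ v :: List.drop k.toNat xs) = _
  unfold PySem.List.sliceIndices
  simp only [show ¬ (1:Int) < 0 by omega, if_false, not_lt.mpr h]
  rcases le_or_gt i (xs.length : Int) with hle | hgt
  · rw [min_eq_left hle]
  · rw [min_eq_right (by omega)]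
    have h1 : xs.take (xs.length : Int).toNat = xs.take i.toNat := by
      rw [List.take_of_length_le (by omega), List.take_of_length_le (by omega)]
    have h2 : xs.drop (xs.length : Int).toNat = xs.drop i.toNat := by
      rw [List.drop_of_length_le (by omega), List.drop_of_length_le (by omega)]
    rw [h1, h2]

lemma pvDiscard_eq_filter (s : List Int) (c : Int) :
    PySem.Set.discard s c = s.filter (fun x => x ≠ c) := by
  unfold PySem.Set.discard
  apply List.filter_congr
  intro x _
  by_cases hxc : x = c <;> simp [hxc]

lemma pvPickB_ex' (l : List (Int × Int × Int)) (hne : l ≠ []) (hnd : (l.map (·.1)).Nodup) :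
    ∃ m, pvPickB l = some m ∧ m ∈ l ∧ ∀ x ∈ l, ¬ pvLtP x m := by
  obtain ⟨a, rest, rfl⟩ := List.exists_cons_of_ne_nil hne
  exact pvPickB_ex a rest hnd

-- the picked record is exactly A's full-scan argmin
lemma pvSelect_eq (d : List (List Int)) (tour unv : List Int) (f : Int → Int × Int)
    (hspec : ∀ c ∈ unv, pvMin2 (pvPairs d tour c) = some (f c))
    (b bb bp : Int) (hb : b ∈ unv) (hfb : f b = (bb, bp))
    (hpall : ∀ x ∈ unv.map (fun c => (c, f c)), ¬ pvLtP x (b, bb, bp)) :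
    pvMin3 (pvCandsA d tour unv) = some (bb, b, bp) := by
  obtain ⟨jb, hjb, hjbeq⟩ := (mem_pvPairs d tour b _).mp
    (pvMin2_spec _ _ ((hspec b hb).trans (congrArg some hfb))).1
  rw [Prod.mk.injEq] at hjbeq
  apply pvMin3_unique
  · rw [mem_pvCandsA]
    refine ⟨b, hb, jb, hjb, ?_⟩
    rw [Prod.mk.injEq, Prod.mk.injEq]
    exact ⟨hjbeq.1, rfl, hjbeq.2⟩
  · intro x hx
    obtain ⟨c, hc, i, hi, rfl⟩ := (mem_pvCandsA d tour unv x).mp hx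
    have h1 := (pvMin2_spec _ _ (hspec c hc)).2 (pvW d tour c i, (i : Int))
      ((mem_pvPairs d tour c _).mpr ⟨i, hi, rfl⟩)
    have h2 := hpall (c, f c) (List.mem_map.mpr ⟨c, hc, rfl⟩)
    by_cases hcb : c = b
    · subst hcb
      rw [hfb] at h1
      simp only [pvLt2, pvLt3] at h1 ⊢
      omega
    · rcases hfc : f c with ⟨q1, q2⟩
      rw [hfc] at h1 h2
      simp only [pvLt2, pvLtP, pvLt3] at h1 h2 ⊢
      omega

-- one round of A equals one round of B, and the invariant is maintained
lemma pvLoopEq (d : List (List Int)) :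
    ∀ (fuel : Nat) (unv tour : List Int) (best : PySem.Dict Int (Int × Int))
      (f : Int → Int × Int),
      unv.Pairwise (· < ·) → tour ≠ [] →
      best.items = unv.map (fun c => (c, f c)) →
      (∀ c ∈ unv, pvMin2 (pvPairs d tour c) = some (f c)) →
      pvLoopA d fuel unv tour = pvLoopBAlt d fuel best tour := by
  intro fuel
  induction fuel with
  | zero => intros; rfl
  | succ k ih =>
    intro unv tour best f hpw htne hitems hspec
    by_cases hemp : unv = []
    · subst hemp
      have hempty : best.items = [] := by simpa using hitems
      simp [pvLoopA, pvLoopBAlt, hempty, pvPickB]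
    · have hlen0 : 0 < tour.length := by cases tour with | nil => exact absurd rfl htne | cons a l => simp
      have hnodup : unv.Nodup := hpw.imp (fun h => ne_of_lt h)
      have hitemsne : best.items ≠ [] := by
        rw [hitems]
        simpa using hemp
      have hndk : (best.items.map (·.1)).Nodup := by
        rw [hitems, List.map_map]
        have hcomp : ((fun x : Int × Int × Int => x.1) ∘ fun c : Int => (c, f c)) = id := rfl
        rw [hcomp, List.map_id]
        exact hnodup
      obtain ⟨m, hpick, hpmem, hpall⟩ := pvPickB_ex' best.items hitemsne hndk
      rw [hitems] at hpmem hpall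
      obtain ⟨b, hbunv, hbm⟩ := List.mem_map.mp hpmem
      rcases hfb : f b with ⟨bb, bp⟩
      have hm : m = (b, bb, bp) := by rw [← hbm, hfb]
      rw [hm] at hpick hpall
      obtain ⟨j, hj, hjeq⟩ := (mem_pvPairs d tour b _).mp
        (pvMin2_spec _ _ ((hspec b hbunv).trans (congrArg some hfb))).1
      rw [Prod.mk.injEq] at hjeq
      have hbp : bp = (j : Int) := hjeq.2
      subst hbp
      have hA : pvBestA d tour unv = some (bb, b, (j : Int)) := by
        rw [pvBestA_eq_incMin, pvIncMin_eq_min3 _ (pvCandsA_pairwise d tour unv hpw)]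
        exact pvSelect_eq d tour unv f hspec b bb (j : Int) hbunv hfb hpall
      have htoNat : ((j : Int) + 1).toNat = j + 1 := by omega
      have hmod : PySem.Int.mod ((j : Int) + 1) (tour.length : Int) =
          (((j + 1) % tour.length : Nat) : Int) := by
        rw [PySem.Int.mod_eq_emod_of_pos (by exact_mod_cast hlen0),
          show ((j : Int) + 1) = (((j + 1 : Nat)) : Int) by push_cast; ring, Int.natCast_mod]
      have herase : (PySem.Dict.erase best b).items =
          (unv.filter (fun x => x ≠ b)).map (fun c => (c, f c)) := by
        show best.items.filter (fun p => !(p.1 == b)) = _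
        rw [hitems, List.filter_map]
        congr 1
        apply List.filter_congr
        intro x _
        by_cases hxb : x = b <;> simp [hxb]
      have hspec' : ∀ c ∈ unv.filter (fun x => x ≠ b),
          pvMin2 (pvPairs d (pvTourIns tour j b) c) =
            some ((pvRepair d (pvTourIns tour j b) (tour.getD j 0) b
              (tour.getD ((j + 1) % tour.length) 0) (j : Int) (c, f c)).2) := by
        intro c hc
        have hcu : c ∈ unv := List.mem_of_mem_filter hc
        obtain ⟨jc, hjc, hjceq⟩ := (mem_pvPairs d tour c _).mp
          (pvMin2_spec _ _ (hspec c hcu)).1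
        rcases hfc : f c with ⟨oc, opc⟩
        rw [hfc, Prod.mk.injEq] at hjceq
        have hold : pvMin2 (pvPairs d tour c) = some (oc, (jc : Int)) := by
          rw [hspec c hcu, hfc, hjceq.2]
        have hrep := pvRepair_spec d tour j hj b c oc jc hold
        rw [hjceq.2]
        exact hrep
      -- reduce A's round
      show (if unv.isEmpty then tour
        else
          match pvBestA d tour unv with
          | none => tour
          | some m' =>
              pvLoopA d k ((PySem.Set.remove? unv m'.2.1).getD unv)
                (PySem.List.insert tour (m'.2.2 + 1) m'.2.1)) = pvLoopBAlt d (k + 1) best tour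
      rw [if_neg (by simpa [List.isEmpty_iff] using hemp), hA]
      show pvLoopA d k ((PySem.Set.remove? unv b).getD unv)
          (PySem.List.insert tour ((j : Int) + 1) b) = pvLoopBAlt d (k + 1) best tour
      rw [PySem.Set.remove?_of_mem hbunv]
      show pvLoopA d k (PySem.Set.discard unv b)
          (PySem.List.insert tour ((j : Int) + 1) b) = pvLoopBAlt d (k + 1) best tour
      rw [pvDiscard_eq_filter, pvInsert_nonneg tour ((j : Int) + 1) b (by omega), htoNat]
      -- reduce B's round
      show pvLoopA d k (unv.filter (fun x => x ≠ b)) (pvTourIns tour j b) =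
        (match pvPickB best.items with
          | none => tour
          | some m' =>
              pvLoopBAlt d k
                (PySem.Dict.mk (((PySem.Dict.erase best m'.1).items).map
                  (pvRepair d
                    (PySem.List.slice tour none (some (m'.2.2 + 1)) ++ [m'.1] ++
                      PySem.List.slice tour (some (m'.2.2 + 1)) none)
                    (PySem.List.pyGetD tour m'.2.2 0) m'.1
                    (PySem.List.pyGetD tour
                      (PySem.Int.mod (m'.2.2 + 1) (tour.length : Int)) 0) m'.2.2)))
                (PySem.List.slice tour none (some (m'.2.2 + 1)) ++ [m'.1] ++
                  PySem.List.slice tour (some (m'.2.2 + 1)) none))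
      rw [hpick]
      show pvLoopA d k (unv.filter (fun x => x ≠ b)) (pvTourIns tour j b) =
        pvLoopBAlt d k
          (PySem.Dict.mk (((PySem.Dict.erase best b).items).map
            (pvRepair d
              (PySem.List.slice tour none (some ((j : Int) + 1)) ++ [b] ++
                PySem.List.slice tour (some ((j : Int) + 1)) none)
              (PySem.List.pyGetD tour (j : Int) 0) b
              (PySem.List.pyGetD tour
                (PySem.Int.mod ((j : Int) + 1) (tour.length : Int)) 0) (j : Int))))
          (PySem.List.slice tour none (some ((j : Int) + 1)) ++ [b] ++
            PySem.List.slice tour (some ((j : Int) + 1)) none)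
      rw [PySem.List.slice_to tour (by omega : (0 : Int) ≤ (j : Int) + 1),
        PySem.List.slice_from tour (by omega : (0 : Int) ≤ (j : Int) + 1), htoNat, hmod,
        PySem.List.pyGetD_natCast, PySem.List.pyGetD_natCast,
        List.append_assoc, List.singleton_append]
      exact ih (unv.filter (fun x => x ≠ b)) (pvTourIns tour j b) _
        (fun c => (pvRepair d (pvTourIns tour j b) (tour.getD j 0) b
          (tour.getD ((j + 1) % tour.length) 0) ((j : Int)) (c, f c)).2)
        (hpw.filter _) (by simp [pvTourIns]) (by rw [herase, List.map_map]; rfl) hspec'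

lemma pvMainEq (distances : List (List Int)) :
    insertion_heuristic_tsp distances = insertion_heuristic_tsp_alt distances := by
  simp only [insertion_heuristic_tsp, insertion_heuristic_tsp_alt]
  rw [PySem.Set.ofList_eq_self_of_nodup _ (PySem.List.nodup_pyRange_one _ _)]
  have hlen : (PySem.List.pyRange 1 (distances.length : Int) 1).length =
      distances.length - 1 := by
    rw [PySem.List.length_pyRange_one]
    omega
  have hinit : (pvInitBest distances (distances.length : Int)).items =
      (PySem.List.pyRange 1 (distances.length : Int) 1).map
        (fun c => (c, (pvCost distances 0 c 0, 0))) :=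
    PySem.Dict.items_foldl_insert_fresh _ (fun c => c)
      (fun c => (pvCost distances 0 c 0, 0)) PySem.Dict.empty
      (fun a _ => rfl)
      (by simpa using PySem.List.nodup_pyRange_one 1 (distances.length : Int))
  rw [hlen, pvLoopEq distances (distances.length - 1)
    (PySem.List.pyRange 1 (distances.length : Int) 1) [0]
    (pvInitBest distances (distances.length : Int))
    (fun c => (pvCost distances 0 c 0, 0))
    (PySem.List.pairwise_lt_pyRange_one 1 _) (by simp) hinit
    (fun c _ => rfl)]

-- ===== VERDICT (by name: the statement is the Claim_ definition above) =====
theorem insertion_heuristic_tsp_spec : Claim_equal_insertion_heuristic_tsp := by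
  intro distances _ _
  exact pvMainEq distances
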